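-- pv_equiv track=rewrite | github.com/chelseashin/My-Algorithm | programmers/완전탐색/모의고사.py | solution
-- ===== SOURCE A (Python) =====
-- def solution(answers):
--     pattern = [[1,2,3,4,5],[2,1,2,3,2,4,2,5],[3,3,1,1,2,2,4,4,5,5]]
--     L = [0] * 3
--     for i, ans in enumerate(answers):
--         if ans == pattern[0][i%5]:
--             L[0] += 1
--         if ans == pattern[1][i%8]:
--             L[1] += 1
--         if ans == pattern[2][i%10]:
--             L[2] += 1
--     MAX = max(L)
--     answers = [i+1 for i in range(len(L)) if L[i] == MAX]
--     return answers
-- ===== SOURCE B (Python) =====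
-- def solution(answers):
--     # Histogram pass: count occurrences of each (index mod 40, answer) pair once
--     # (40 = lcm of the three pattern periods), then each pattern's score is a
--     # fixed sum of 40 table lookups -- no per-pattern scan of the answers.
--     counts = {}
--     for i, a in enumerate(answers):
--         k = (i % 40, a)
--         counts[k] = counts.get(k, 0) + 1
--     patterns = [[1, 2, 3, 4, 5], [2, 1, 2, 3, 2, 4, 2, 5], [3, 3, 1, 1, 2, 2, 4, 4, 5, 5]]
--     scores = [sum(counts.get((j, pat[j % len(pat)]), 0) for j in range(40))
--               for pat in patterns]
--     best = max(scores)
--     return [k + 1 for k in range(3) if scores[k] == best]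
-- ===== Notes on version B (the rewrite author's own statement) =====
-- stated objective: alternative
-- what changed: B replaces A's interleaved per-element matching against three cyclic patterns with a histogram keyed by (index mod 40, answer) built in one pass, after which each pattern's score is a fixed sum of 40 table lookups (no pattern comparison per element).
import Mathlib
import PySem

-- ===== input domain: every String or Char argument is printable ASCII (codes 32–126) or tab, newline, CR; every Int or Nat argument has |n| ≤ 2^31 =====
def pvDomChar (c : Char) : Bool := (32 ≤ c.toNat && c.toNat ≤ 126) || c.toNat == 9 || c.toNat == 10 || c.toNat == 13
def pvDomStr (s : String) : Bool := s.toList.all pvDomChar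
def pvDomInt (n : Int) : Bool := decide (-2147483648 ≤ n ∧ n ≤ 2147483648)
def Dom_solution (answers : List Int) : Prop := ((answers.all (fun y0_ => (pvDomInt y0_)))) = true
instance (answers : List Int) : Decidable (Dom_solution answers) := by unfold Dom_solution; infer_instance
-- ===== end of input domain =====

-- B replaces A's interleaved per-element pattern matching with a histogram keyed by
-- (index mod 40, answer) built in one pass; each pattern's score is then a fixed sum
-- of 40 table lookups. Same return value everywhere.

-- ===== PORT A =====
-- The for-loop over enumerate(answers) with the mutable 3-element list L is ported as an
-- index-carrying structural recursion over the same state (L as a triple; exact since L has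
-- fixed length 3 and only its cells are updated). pattern[k][i%n] is always in range, so getD
-- never takes its default.
def solGoA : List Int → Nat → Int → Int → Int → Int × Int × Int
  | [], _, l0, l1, l2 => (l0, l1, l2)
  | a :: rest, i, l0, l1, l2 =>
      solGoA rest (i + 1)
        (if a == ([1,2,3,4,5] : List Int).getD (i % 5) 0 then l0 + 1 else l0)
        (if a == ([2,1,2,3,2,4,2,5] : List Int).getD (i % 8) 0 then l1 + 1 else l1)
        (if a == ([3,3,1,1,2,2,4,4,5,5] : List Int).getD (i % 10) 0 then l2 + 1 else l2)

def solution (answers : List Int) : List Int :=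
  let L := solGoA answers 0 0 0 0
  -- max(L) on the 3-element list L is the binary max chain (exact: L is never empty);
  -- [i+1 for i in range(len(L)) if L[i] == MAX] is written out cell by cell.
  let MAX := max L.1 (max L.2.1 L.2.2)
  (if L.1 == MAX then [(1 : Int)] else []) ++
  (if L.2.1 == MAX then [(2 : Int)] else []) ++
  (if L.2.2 == MAX then [(3 : Int)] else [])

-- ===== PORT B =====
-- counts[k] = counts.get(k, 0) + 1 over enumerate(answers), with k = (i % 40, a)
def histKey (p : Int × Int) : Int × Int := (PySem.Int.mod p.1 40, p.2)

def solution_alt (answers : List Int) : List Int :=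
  let counts := (PySem.List.enumerate answers).foldl
      (fun d p => let k := histKey p; d.insert k (d.getD k 0 + 1))
      (PySem.Dict.empty : PySem.Dict (Int × Int) Int)
  let patterns : List (List Int) := [[1,2,3,4,5], [2,1,2,3,2,4,2,5], [3,3,1,1,2,2,4,4,5,5]]
  -- sum(counts.get((j, pat[j % len(pat)]), 0) for j in range(40))
  let scores := patterns.map (fun pat =>
      ((PySem.List.pyRange 0 40 1).map (fun j =>
        counts.getD (j, PySem.List.pyGetD pat (PySem.Int.mod j (pat.length : Int)) 0) 0)).sum)
  -- max(scores): scores always has 3 elements, so max? is some and getD never takes its default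
  let best := (PySem.List.max? scores (fun y => y)).getD 0
  ((List.range 3).filter (fun k => scores.getD k 0 == best)).map (fun k => (k : Int) + 1)

-- ===== PRECONDITION & SPEC =====
def Spec_solution (answers : List Int) (out : List Int) : Prop := out = solution_alt answers
instance (answers : List Int) (out : List Int) : Decidable (Spec_solution answers out) := by unfold Spec_solution; infer_instance

-- ===== CLAIM (what is proved, stated in full; the proofs are below) =====
def Claim_equal_solution : Prop := ∀ (answers : List Int), Dom_solution answers → Spec_solution answers (solution answers)

-- ===== LEMMAS AND PROOFS =====

-- proof-only reference counter: matches of answers against one cyclic pattern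
def scoreGo (pat : List Int) : List Int → Nat → Int → Int
  | [], _, s => s
  | a :: rest, i, s =>
      scoreGo pat rest (i + 1) (if a == pat.getD (i % pat.length) 0 then s + 1 else s)

theorem scoreGo_shift (pat l : List Int) (i : Nat) (s : Int) :
    scoreGo pat l i s = s + scoreGo pat l i 0 := by
  induction l generalizing i s with
  | nil => simp [scoreGo]
  | cons a rest ih =>
      simp only [scoreGo]
      rw [ih, ih (s := if a == pat.getD (i % pat.length) 0 then 0 + 1 else 0)]
      split <;> ring

theorem scoreGo_step (pat rest : List Int) (j : Nat) (c : Bool) (l : Int) :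
    (if c = true then l + 1 else l) + scoreGo pat rest j 0 =
      l + scoreGo pat rest j (if c = true then 0 + 1 else 0) := by
  rw [scoreGo_shift pat rest j (if c = true then 0 + 1 else 0)]
  cases c <;> simp <;> ring

-- A's interleaved loop computes the three per-pattern match counts
theorem solGoA_eq (l : List Int) (i : Nat) (l0 l1 l2 : Int) :
    solGoA l i l0 l1 l2 =
      (l0 + scoreGo [1,2,3,4,5] l i 0,
       l1 + scoreGo [2,1,2,3,2,4,2,5] l i 0,
       l2 + scoreGo [3,3,1,1,2,2,4,4,5,5] l i 0) := by
  induction l generalizing i l0 l1 l2 with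
  | nil => simp [solGoA, scoreGo]
  | cons a rest ih =>
      simp only [solGoA, scoreGo, ih, List.length, Nat.reduceAdd]
      refine Prod.ext ?_ (Prod.ext ?_ ?_) <;> apply scoreGo_step

-- indicator sums over range 40
theorem sum_indicator_eq_one (n t : Nat) (f : Nat → Int × Int) (x : Int × Int)
    (ht : t < n) (hkey : ∀ j, j < n → (x = f j ↔ j = t)) :
    ((List.range n).map (fun j => if x = f j then (1:Int) else 0)).sum = 1 := by
  induction n with
  | zero => omega
  | succ n ih =>
      rw [List.range_succ, List.map_append, List.sum_append]
      by_cases h : t = n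
      · have hz : ((List.range n).map (fun j => if x = f j then (1:Int) else 0)).sum = 0 := by
          apply List.sum_eq_zero
          intro y hy
          simp only [List.mem_map, List.mem_range] at hy
          obtain ⟨j, hj, rfl⟩ := hy
          have hne : ¬ x = f j := by
            intro hx
            have := (hkey j (by omega)).mp hx
            omega
          simp [hne]
        have hone : x = f n := (hkey n (by omega)).mpr h.symm
        rw [hz]
        simp [if_pos hone]
      · have hz : ((List.map (fun j => if x = f j then (1:Int) else 0) [n])).sum = 0 := by
          have hne : ¬ x = f n := by
            intro hx
            have := (hkey n (by omega)).mp hx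
            omega
          simp [hne]
        rw [hz, ih (by omega) (fun j hj => hkey j (by omega))]
        ring

theorem sum_indicator_eq_zero (n : Nat) (f : Nat → Int × Int) (x : Int × Int)
    (hkey : ∀ j, j < n → x ≠ f j) :
    ((List.range n).map (fun j => if x = f j then (1:Int) else 0)).sum = 0 := by
  apply List.sum_eq_zero
  intro y hy
  simp only [List.mem_map, List.mem_range] at hy
  obtain ⟨j, hj, rfl⟩ := hy
  simp [hkey j hj]

-- the histogram-lookup sum for one pattern equals the direct match count
theorem hist_sum_eq_scoreGo (pat : List Int) (m : Nat) (hm : pat.length = m)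
    (hpos : 0 < m) (hdvd : m ∣ 40) (l : List Int) (i : Nat) :
    ((List.range 40).map (fun (j : Nat) =>
        ((((PySem.List.enumerate l (i:Int)).map histKey).count
          ((j : Int), pat.getD (j % m) 0) : Nat) : Int))).sum = scoreGo pat l i 0 := by
  induction l generalizing i with
  | nil =>
      simp [PySem.List.enumerate_nil, scoreGo]
  | cons a rest ih =>
      have hkeycast : PySem.Int.mod (i:Int) 40 = ((i % 40 : Nat) : Int) := by
        exact_mod_cast PySem.Int.mod_natCast i 40
      rw [PySem.List.enumerate_cons, List.map_cons]
      simp only [List.count_cons, histKey, hkeycast, Nat.cast_add, Nat.cast_ite,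
        Nat.cast_one, Nat.cast_zero]
      rw [PySem.List.sum_map_add_int]
      have hc : ((i:Int) + 1) = ((i+1 : Nat) : Int) := by push_cast; ring
      rw [hc, ih (i+1)]
      have hmm : (i % 40) % m = i % m := Nat.mod_mod_of_dvd i hdvd
      have hind : ((List.range 40).map (fun (j : Nat) =>
          if (((((i % 40 : Nat) : Int), a) : Int × Int) == ((j:Int), pat.getD (j % m) 0))
          then (1:Int) else 0)).sum
          = if a == pat.getD (i % m) 0 then (1:Int) else 0 := by
        simp only [beq_iff_eq]
        by_cases ha : a = pat.getD (i % m) 0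
        · rw [if_pos ha]
          exact sum_indicator_eq_one 40 (i % 40)
            (fun j => ((j:Int), pat.getD (j % m) 0)) (((i % 40 : Nat) : Int), a)
            (Nat.mod_lt i (by omega))
            (by
              intro j hj
              dsimp only
              rw [Prod.mk.injEq]
              constructor
              · rintro ⟨h1, h2⟩
                exact_mod_cast h1.symm
              · rintro rfl
                refine ⟨rfl, ?_⟩
                rw [hmm, ha])
        · rw [if_neg ha]
          exact sum_indicator_eq_zero 40
            (fun j => ((j:Int), pat.getD (j % m) 0)) (((i % 40 : Nat) : Int), a)
            (by
              intro j hj hx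
              dsimp only at hx
              rw [Prod.mk.injEq] at hx
              obtain ⟨h1, h2⟩ := hx
              have hji : j = i % 40 := by exact_mod_cast h1.symm
              subst hji
              rw [hmm] at h2
              exact ha h2)
      rw [hind]
      simp only [scoreGo, hm]
      split
      · rw [scoreGo_shift pat rest (i+1) (0+1)]; ring
      · rw [scoreGo_shift pat rest (i+1) 0]; ring

-- the two finishes agree
theorem final_eq (s0 s1 s2 : Int) :
    (if s0 == max s0 (max s1 s2) then [(1:Int)] else []) ++
    (if s1 == max s0 (max s1 s2) then [(2:Int)] else []) ++
    (if s2 == max s0 (max s1 s2) then [(3:Int)] else []) =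
    (((List.range 3).filter (fun i => ([s0,s1,s2] : List Int).getD i 0 == (max (max s0 s1) s2))).map (fun i => (i : Int) + 1)) := by
  rw [show max (max s0 s1) s2 = max s0 (max s1 s2) from max_assoc s0 s1 s2]
  norm_num [List.range_succ, List.filter_cons, List.filter_nil, List.getD]
  split_ifs <;> try rfl

-- one pattern's histogram-lookup sum, as written in the B port, in terms of scoreGo
theorem score_eq (pat : List Int) (m : Nat) (hm : pat.length = m) (hpos : 0 < m)
    (hdvd : m ∣ 40) (answers : List Int) :
    ((PySem.List.pyRange 0 40 1).map (fun j =>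
      (PySem.Dict.counter ((PySem.List.enumerate answers 0).map histKey)).getD
        (j, PySem.List.pyGetD pat (PySem.Int.mod j (pat.length : Int)) 0) 0)).sum
    = scoreGo pat answers 0 0 := by
  rw [PySem.List.pyRange_one, List.map_map]
  have h := hist_sum_eq_scoreGo pat m hm hpos hdvd answers 0
  rw [← h]
  refine congrArg List.sum (List.map_congr_left ?_)
  intro k hk
  dsimp only [Function.comp]
  rw [hm]
  rw [show ((0:Int) + (k:Int)) = ((k:Nat):Int) from zero_add _]
  rw [show PySem.Int.mod ((k:Nat):Int) ((m:Nat):Int) = ((k % m : Nat):Int) from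
    PySem.Int.mod_natCast k m]
  rw [PySem.List.pyGetD_natCast]
  rw [PySem.Dict.getD_counter]
  norm_num

-- the two finishes agree
-- (kept from the statement side: cell-by-cell vs range-filter over the score list)

-- ===== VERDICT (by name: the statement is the Claim_ definition above) =====
theorem solution_spec : Claim_equal_solution := by
  intro answers _
  show solution answers = solution_alt answers
  simp only [solution, solution_alt, solGoA_eq, zero_add, List.map_cons, List.map_nil]
  set G := List.foldl
      (fun (d : PySem.Dict (Int × Int) Int) p => d.insert (histKey p) (d.getD (histKey p) 0 + 1))
      PySem.Dict.empty (PySem.List.enumerate answers) with hG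
  rw [show G = PySem.Dict.counter ((PySem.List.enumerate answers 0).map histKey) from by
    rw [hG, ← PySem.Dict.foldl_insert_getD_add_one_eq_counter, List.foldl_map]]
  rw [score_eq [1,2,3,4,5] 5 rfl (by norm_num) (by norm_num) answers,
      score_eq [2,1,2,3,2,4,2,5] 8 rfl (by norm_num) (by norm_num) answers,
      score_eq [3,3,1,1,2,2,4,4,5,5] 10 rfl (by norm_num) (by norm_num) answers]
  simp only [PySem.List.max?_id_cons, List.foldl, Option.getD_some]
  exact final_eq _ _ _
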